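-- pv_equiv track=rewrite | github.com/yongu2000/algorithm | 프로그래머스/Lv2/택배상자.py | solution
-- ===== SOURCE A (Python) =====
-- def solution(order):
--     answer = 0
--     n = len(order)
--     order = list(reversed(order))
--     storage = []
--
--     for i in range(1, n+1):
--         if order and i == order[-1]:
--             order.pop()
--             answer += 1
--         else:
--             storage.append(i)
--
--         while storage and order and storage[-1] == order[-1]:
--             storage.pop()
--             order.pop()
--             answer += 1
--     return answer
-- ===== SOURCE B (Python) =====
-- def solution(order):
--     n = len(order)
--     storage = []
--     belt = 1
--     answer = 0
--     for target in order:
--         while belt <= n and (not storage or storage[-1] != target):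
--             storage.append(belt)
--             belt += 1
--         if storage and storage[-1] == target:
--             storage.pop()
--             answer += 1
--         else:
--             break
--     return answer
-- ===== Notes on version B (the rewrite author's own statement) =====
-- stated objective: alternative
-- what changed: B iterates over the target sequence directly with a belt counter and a push-until-match inner loop plus an early break, instead of A's loop over belt numbers 1..n with a special direct-match branch and a drain-while loop after every belt step.
import Mathlib
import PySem

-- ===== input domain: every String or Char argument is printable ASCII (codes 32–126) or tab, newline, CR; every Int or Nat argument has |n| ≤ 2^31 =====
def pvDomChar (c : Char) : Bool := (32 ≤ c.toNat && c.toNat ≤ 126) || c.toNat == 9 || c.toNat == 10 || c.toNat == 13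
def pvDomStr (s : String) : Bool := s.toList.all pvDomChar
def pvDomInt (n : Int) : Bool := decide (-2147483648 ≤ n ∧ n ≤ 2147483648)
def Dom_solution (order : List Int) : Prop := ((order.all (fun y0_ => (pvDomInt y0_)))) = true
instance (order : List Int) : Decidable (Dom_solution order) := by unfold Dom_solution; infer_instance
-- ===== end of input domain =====

-- B loops over the target sequence with a belt counter and an early break instead of A's
-- loop over belt numbers with a direct-match branch; alternative decomposition, same cost.
-- Python lists are ported verbatim (append = ++ [·], list[-1] = getLast?, pop = dropLast).

-- ===== PORT A =====
-- the inner `while storage and order and storage[-1] == order[-1]` loop of A,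
-- state (rev, storage, answer); terminates because each pass pops `rev`
def pvDrainA (rev storage : List Int) (answer : Int) : List Int × List Int × Int :=
  if h : storage ≠ [] ∧ rev ≠ [] ∧ storage.getLast? = rev.getLast? then
    pvDrainA rev.dropLast storage.dropLast (answer + 1)
  else (rev, storage, answer)
termination_by rev.length
decreasing_by
  have := List.length_pos_of_ne_nil h.2.1
  simp [List.length_dropLast]
  omega

-- one iteration of A's `for i in range(1, n+1)` loop
def pvStepA (st : List Int × List Int × Int) (i : Int) : List Int × List Int × Int :=
  let (rev, storage, answer) := st
  if rev ≠ [] ∧ PySem.List.pyGet? rev (-1) = some i then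
    pvDrainA rev.dropLast storage (answer + 1)
  else
    pvDrainA rev (storage ++ [i]) answer

def solution (order : List Int) : Int :=
  let n : Int := order.length
  let rev := order.reverse           -- order = list(reversed(order))
  let st := (PySem.List.pyRange 1 (n + 1) 1).foldl pvStepA (rev, ([] : List Int), (0 : Int))
  st.2.2

-- ===== PORT B =====
-- B's inner `while belt <= n and (not storage or storage[-1] != target)` loop;
-- terminates because belt increases towards n
def pvPushB (n belt : Int) (storage : List Int) (target : Int) : Int × List Int :=
  if _h : belt ≤ n ∧ (storage = [] ∨ storage.getLast? ≠ some target) then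
    pvPushB n (belt + 1) (storage ++ [belt]) target
  else (belt, storage)
termination_by (n + 1 - belt).toNat
decreasing_by omega

-- B's `for target in order` loop with the early break
def pvLoopB (n belt : Int) (storage : List Int) (answer : Int) : List Int → Int
  | [] => answer
  | target :: rest =>
    let (belt', storage') := pvPushB n belt storage target
    if storage' ≠ [] ∧ storage'.getLast? = some target then
      pvLoopB n belt' storage'.dropLast (answer + 1) rest
    else answer

def solution_alt (order : List Int) : Int :=
  pvLoopB order.length 1 [] 0 order

-- ===== PRECONDITION & SPEC =====
def Spec_solution (order : List Int) (out : Int) : Prop := out = solution_alt order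
instance (order : List Int) (out : Int) : Decidable (Spec_solution order out) := by unfold Spec_solution; infer_instance

-- ===== CLAIM (what is proved, stated in full; the proofs are below) =====
def Claim_equal_solution : Prop := ∀ (order : List Int), Dom_solution order → Spec_solution order (solution order)

-- ===== LEMMAS AND PROOFS =====

-- head/top-at-front mirror images of the two programs, used only in the proofs;
-- q = remaining targets from the front, s = storage with top first
def pvDrain' (q s : List Int) (a : Int) : List Int × List Int × Int :=
  match q, s with
  | t :: q', x :: s' => if x = t then pvDrain' q' s' (a + 1) else (t :: q', x :: s', a)
  | q, s => (q, s, a)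

def pvStep' (st : List Int × List Int × Int) (i : Int) : List Int × List Int × Int :=
  let (q, s, a) := st
  if q.head? = some i then pvDrain' q.tail s (a + 1)
  else pvDrain' q (i :: s) a

def pvPush' (n belt : Int) (s : List Int) (target : Int) : Int × List Int :=
  if h : belt ≤ n ∧ (s = [] ∨ s.head? ≠ some target) then
    pvPush' n (belt + 1) (belt :: s) target
  else (belt, s)
termination_by (n + 1 - belt).toNat
decreasing_by omega

def pvLoop' (n belt : Int) (s : List Int) (a : Int) : List Int → Int
  | [] => a
  | t :: rest =>
    let (belt', s') := pvPush' n belt s t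
    if s'.head? = some t then pvLoop' n belt' s'.tail (a + 1) rest
    else a

-- single-step simulation both programs compute
def pvSim (n belt : Int) (s q : List Int) (a : Int) : Int :=
  match q with
  | [] => a
  | t :: q' =>
    match s with
    | x :: s' =>
      if x = t then pvSim n belt s' q' (a + 1)
      else if h : belt ≤ n then pvSim n (belt + 1) (belt :: x :: s') (t :: q') a
      else a
    | [] =>
      if h : belt ≤ n then pvSim n (belt + 1) [belt] (t :: q') a
      else a
termination_by (q.length, (n + 1 - belt).toNat)
decreasing_by
  · simp; omega
  · right; omega
  · right; omega

-- the state is "drained": the inner while loop of A would not fire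
def pvDr (q s : List Int) : Prop := q = [] ∨ s = [] ∨ s.head? ≠ q.head?

theorem dropLast_reverse' {α : Type} (l : List α) : l.reverse.dropLast = l.tail.reverse := by
  cases l with
  | nil => rfl
  | cons x xs => simp

theorem pvDrainA_eq (q s : List Int) (a : Int) :
    pvDrainA q.reverse s.reverse a =
      ((pvDrain' q s a).1.reverse, (pvDrain' q s a).2.1.reverse, (pvDrain' q s a).2.2) := by
  fun_induction pvDrain' q s a with
  | case1 a t q' s' ih =>
    rw [pvDrainA.eq_def]
    simp only [List.getLast?_reverse, List.head?_cons, dropLast_reverse', List.tail_cons,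
      ne_eq, List.reverse_eq_nil_iff]
    simp [ih]
  | case2 a t q' x s' h =>
    rw [pvDrainA.eq_def]
    simp [List.getLast?_reverse, h]
  | case3 a q s h =>
    rw [pvDrainA.eq_def]
    match q, s with
    | [], s => simp
    | q, [] => simp
    | t :: q', x :: s' => exact absurd (h t q' x s' rfl rfl) (fun f => f)

theorem pvDrain'_dr (q s : List Int) (a : Int) :
    pvDr (pvDrain' q s a).1 (pvDrain' q s a).2.1 := by
  fun_induction pvDrain' q s a with
  | case1 a t q' s' ih => exact ih
  | case2 a t q' x s' h => exact Or.inr (Or.inr (by simp [h]))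
  | case3 a q s h =>
    match q, s with
    | [], s => exact Or.inl rfl
    | q, [] => exact Or.inr (Or.inl rfl)
    | t :: q', x :: s' => exact absurd (h t q' x s' rfl rfl) (fun f => f)

theorem pvSim_drain (n belt : Int) (q s : List Int) (a : Int) :
    pvSim n belt s q a =
      pvSim n belt (pvDrain' q s a).2.1 (pvDrain' q s a).1 (pvDrain' q s a).2.2 := by
  fun_induction pvDrain' q s a with
  | case1 a t q' s' ih =>
    rw [pvSim.eq_def]
    simpa using ih
  | case2 a t q' x s' h => rfl
  | case3 a q s h => rfl

theorem pvSim_nil (n belt : Int) (s : List Int) (a : Int) : pvSim n belt s [] a = a := by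
  rw [pvSim.eq_def]

theorem pvSim_push (n i : Int) (s q : List Int) (a : Int) (hb : i ≤ n)
    (hdr2 : s = [] ∨ s.head? ≠ q.head?) :
    pvSim n i s q a = pvSim n (i + 1) (i :: s) q a := by
  cases q with
  | nil => rw [pvSim_nil, pvSim_nil]
  | cons t q' =>
    rcases hdr2 with h | h
    · subst h
      conv_lhs => rw [pvSim.eq_def]
      simp [hb]
    · cases s with
      | nil =>
        conv_lhs => rw [pvSim.eq_def]
        simp [hb]
      | cons x s' =>
        have hx : ¬ x = t := by simpa using h
        conv_lhs => rw [pvSim.eq_def]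
        simp [hx, hb]

theorem pvSim_pop (n belt : Int) (t : Int) (s q' : List Int) (a : Int) :
    pvSim n belt (t :: s) (t :: q') a = pvSim n belt s q' (a + 1) := by
  conv_lhs => rw [pvSim.eq_def]
  simp

theorem pvFold_q_nil (l : List Int) (s : List Int) (a : Int) :
    (l.foldl pvStep' ([], s, a)).2.2 = a := by
  induction l generalizing s with
  | nil => rfl
  | cons i l ih =>
    show (l.foldl pvStep' (pvStep' ([], s, a) i)).2.2 = a
    simp only [pvStep', List.head?_nil, pvDrain']
    exact ih (i :: s)

theorem pvFold_eq_sim (m : Nat) (i n : Int) (q s : List Int) (a : Int)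
    (hm : (n + 1 - i).toNat = m) (hdr : pvDr q s) :
    ((PySem.List.pyRange i (n + 1) 1).foldl pvStep' (q, s, a)).2.2 = pvSim n i s q a := by
  induction m generalizing i q s a with
  | zero =>
    have hi : n + 1 ≤ i := by omega
    have hb : ¬ i ≤ n := by omega
    rw [PySem.List.pyRange_one_eq_nil hi, List.foldl_nil]
    cases q with
    | nil => rw [pvSim_nil]
    | cons t q' =>
      rcases hdr with h | h | h
      · simp at h
      · subst h
        rw [pvSim.eq_def]
        simp [hb]
      · cases s with
        | nil =>
          rw [pvSim.eq_def]
          simp [hb]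
        | cons x s' =>
          have hx : ¬ x = t := by simpa using h
          rw [pvSim.eq_def]
          simp [hx, hb]
  | succ m ih =>
    have hi : i < n + 1 := by omega
    have hb : i ≤ n := by omega
    rw [PySem.List.pyRange_one_cons hi, List.foldl_cons]
    cases q with
    | nil =>
      have hstep : pvStep' ([], s, a) i = ([], i :: s, a) := by simp [pvStep', pvDrain']
      rw [hstep, pvFold_q_nil, pvSim_nil]
    | cons t q' =>
      by_cases ht : t = i
      · have hstep : pvStep' (t :: q', s, a) i = pvDrain' q' s (a + 1) := by
          simp [pvStep', ht]
        rw [hstep]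
        cases hr : pvDrain' q' s (a + 1) with
        | mk q2 r2 =>
          have hdr2 := pvDrain'_dr q' s (a + 1)
          have hsd := pvSim_drain n (i + 1) q' s (a + 1)
          rw [hr] at hdr2 hsd
          rw [ih (i + 1) q2 r2.1 r2.2 (by omega) hdr2, ← hsd]
        -- left side is now the fold result rewritten; close the pvSim chain
          have hpre : s = [] ∨ s.head? ≠ (t :: q').head? := by
            rcases hdr with h | h | h
            · simp at h
            · exact Or.inl h
            · exact Or.inr h
          rw [pvSim_push n i s (t :: q') a hb hpre, ht, pvSim_pop]
      · have hstep : pvStep' (t :: q', s, a) i = pvDrain' (t :: q') (i :: s) a := by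
          simp [pvStep', ht]
        rw [hstep]
        cases hr : pvDrain' (t :: q') (i :: s) a with
        | mk q2 r2 =>
          have hdr2 := pvDrain'_dr (t :: q') (i :: s) a
          have hsd := pvSim_drain n (i + 1) (t :: q') (i :: s) a
          rw [hr] at hdr2 hsd
          rw [ih (i + 1) q2 r2.1 r2.2 (by omega) hdr2, ← hsd]
          have hpre : s = [] ∨ s.head? ≠ (t :: q').head? := by
            rcases hdr with h | h | h
            · simp at h
            · exact Or.inl h
            · exact Or.inr h
          rw [pvSim_push n i s (t :: q') a hb hpre]

theorem pvPush'_eq (n belt : Int) (s : List Int) (t : Int) :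
    pvPushB n belt s.reverse t = ((pvPush' n belt s t).1, (pvPush' n belt s t).2.reverse) := by
  fun_induction pvPush' n belt s t with
  | case1 belt s h ih =>
    rw [pvPushB.eq_def]
    simp only [List.getLast?_reverse, List.reverse_eq_nil_iff, ne_eq]
    rw [dif_pos (by tauto)]
    simpa using ih
  | case2 belt s h =>
    rw [pvPushB.eq_def]
    simp only [List.getLast?_reverse, List.reverse_eq_nil_iff, ne_eq]
    rw [dif_neg (by tauto)]

theorem pvLoop'_eq (n belt : Int) (s : List Int) (a : Int) (q : List Int) :
    pvLoopB n belt s.reverse a q = pvLoop' n belt s a q := by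
  induction q generalizing belt s a with
  | nil => rfl
  | cons t rest ih =>
    show (let (belt', storage') := pvPushB n belt s.reverse t;
        if storage' ≠ [] ∧ storage'.getLast? = some t then
          pvLoopB n belt' storage'.dropLast (a + 1) rest
        else a) = _
    rw [pvPush'_eq]
    conv_rhs => rw [pvLoop']
    cases hr : pvPush' n belt s t with
    | mk b2 s2 =>
      simp only [ne_eq, List.reverse_eq_nil_iff, List.getLast?_reverse, dropLast_reverse']
      by_cases hh : s2.head? = some t
      · rw [if_pos ⟨by intro he; rw [he] at hh; simp at hh, hh⟩, if_pos hh, ih]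
      · rw [if_neg (by tauto), if_neg hh]

theorem pvPush'_sim (m : Nat) (n belt : Int) (s : List Int) (t : Int) (q' : List Int) (a : Int)
    (hm : (n + 1 - belt).toNat = m) :
    pvSim n belt s (t :: q') a =
      (if ((pvPush' n belt s t).2).head? = some t then
        pvSim n (pvPush' n belt s t).1 ((pvPush' n belt s t).2).tail q' (a + 1)
      else a) := by
  induction m generalizing belt s with
  | zero =>
    have hb : ¬ belt ≤ n := by omega
    rw [pvPush'.eq_def, dif_neg (by tauto)]
    cases s with
    | nil =>
      rw [pvSim.eq_def]
      simp [hb]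
    | cons x s' =>
      by_cases hx : x = t
      · subst hx
        rw [pvSim.eq_def]
        simp
      · rw [pvSim.eq_def]
        simp [hx, hb]
  | succ m ih =>
    by_cases hc : belt ≤ n ∧ (s = [] ∨ s.head? ≠ some t)
    · rw [pvPush'.eq_def, dif_pos hc]
      have step : pvSim n belt s (t :: q') a = pvSim n (belt + 1) (belt :: s) (t :: q') a :=
        pvSim_push n belt s (t :: q') a hc.1 (by simpa using hc.2)
      rw [step, ih (belt + 1) (belt :: s) (by omega)]
    · rw [pvPush'.eq_def, dif_neg hc]
      push Not at hc
      cases s with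
      | nil =>
        have hb : ¬ belt ≤ n := by
          intro h
          exact (hc h).1 rfl
        rw [pvSim.eq_def]
        simp [hb]
      | cons x s' =>
        by_cases hx : x = t
        · subst hx
          rw [pvSim.eq_def]
          simp
        · have hb : ¬ belt ≤ n := by
            intro h
            have := (hc h).2
            simp [hx] at this
          rw [pvSim.eq_def]
          simp [hx, hb]

theorem pvLoop'_sim (q : List Int) (n belt : Int) (s : List Int) (a : Int) :
    pvLoop' n belt s a q = pvSim n belt s q a := by
  induction q generalizing belt s a with
  | nil => rw [pvSim_nil]; rfl
  | cons t rest ih =>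
    rw [pvPush'_sim (n + 1 - belt).toNat n belt s t rest a rfl, pvLoop']
    cases hr : pvPush' n belt s t with
    | mk b2 s2 =>
      simp only
      by_cases hh : s2.head? = some t
      · rw [if_pos hh, if_pos hh, ih]
      · rw [if_neg hh, if_neg hh]

theorem pvStepA_eq (q s : List Int) (a : Int) (i : Int) :
    pvStepA (q.reverse, s.reverse, a) i =
      ((pvStep' (q, s, a) i).1.reverse, (pvStep' (q, s, a) i).2.1.reverse,
        (pvStep' (q, s, a) i).2.2) := by
  simp only [pvStepA, pvStep', PySem.List.pyGet?_neg_one, List.getLast?_reverse, ne_eq,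
    List.reverse_eq_nil_iff]
  by_cases hq : q.head? = some i
  · rw [if_pos ⟨by intro he; rw [he] at hq; simp at hq, hq⟩, if_pos hq, dropLast_reverse',
      pvDrainA_eq]
  · rw [if_neg (by tauto), if_neg hq]
    have hrev : s.reverse ++ [i] = (i :: s).reverse := by simp
    rw [hrev, pvDrainA_eq]

theorem pvFoldA_eq (l : List Int) (q s : List Int) (a : Int) :
    (l.foldl pvStepA (q.reverse, s.reverse, a)).2.2 = (l.foldl pvStep' (q, s, a)).2.2 := by
  induction l generalizing q s a with
  | nil => rfl
  | cons i l ih =>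
    rw [List.foldl_cons, List.foldl_cons, pvStepA_eq]
    cases hr : pvStep' (q, s, a) i with
    | mk q2 r2 =>
      cases r2 with
      | mk s2 a2 => exact ih q2 s2 a2

-- ===== VERDICT (by name: the statement is the Claim_ definition above) =====
theorem solution_spec : Claim_equal_solution := by
  intro order _
  unfold Spec_solution solution solution_alt
  show (List.foldl pvStepA (order.reverse, ([] : List Int).reverse, (0 : Int))
      (PySem.List.pyRange 1 ((order.length : Int) + 1) 1)).2.2 =
    pvLoopB order.length 1 ([] : List Int).reverse 0 order
  rw [pvFoldA_eq, pvLoop'_eq, pvLoop'_sim,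
    pvFold_eq_sim ((order.length : Int) + 1 - 1).toNat 1 order.length order [] 0 rfl
      (Or.inr (Or.inl rfl))]
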